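-- pv_equiv track=rewrite | github.com/xinren1232/KG | api/parsers/enhanced_excel_parser.py | _find_matching_column
-- ===== SOURCE A (Python) =====
-- from typing import List, Dict, Any, Optional
--
-- def _find_matching_column(target: str, columns: List[str]) -> Optional[str]:
--     """查找匹配的列名"""
--     # 1. 精确匹配
--     if target in columns:
--         return target
--
--     # 2. 去除空格匹配
--     target_clean = target.replace(" ", "").lower()
--     for col in columns:
--         if col.replace(" ", "").lower() == target_clean:
--             return col
--
--     # 3. 包含匹配
--     for col in columns:
--         if target in col or col in target:
--             return col
--
--     # 4. 模糊匹配（关键词）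
--     target_keywords = target.split()
--     for col in columns:
--         for keyword in target_keywords:
--             if keyword in col:
--                 return col
--
--     return None
-- ===== SOURCE B (Python) =====
-- def _find_matching_column(target, columns):
--     """Single pass: each column gets a priority tier (1 exact, 2 cleaned, 3 containment,
--     4 keyword); keep the first column of the lowest tier, only testing tiers below the
--     current best (lower tiers win, so higher predicates need not be evaluated)."""
--     target_clean = target.replace(" ", "").lower()
--     target_keywords = target.split()
--
--     def tier_below(col, bound):
--         # the tier of col if it is < bound, else None
--         if col == target:
--             return 1
--         if bound > 2 and col.replace(" ", "").lower() == target_clean: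
--             return 2
--         if bound > 3 and (target in col or col in target):
--             return 3
--         if bound > 4 and any(k in col for k in target_keywords):
--             return 4
--         return None
--
--     best = None   # the first column of the lowest tier seen so far
--     bound = 5     # = best's tier (5 while best is None)
--     for col in columns:
--         t = tier_below(col, bound)
--         if t is not None:
--             best, bound = col, t
--             if t == 1:
--                 break
--     if best is None:
--         return None
--     return target if bound == 1 else best
-- ===== Notes on version B (the rewrite author's own statement) =====
-- stated objective: alternative
-- what changed: Replaced A's four sequential scans over columns (exact, space-stripped-lowercase, containment, keyword) by a single pass that assigns each column a priority tier via the same predicates, testing only tiers below the current best, keeping the first column of the lowest tier and breaking on an exact match.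
import Mathlib
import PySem

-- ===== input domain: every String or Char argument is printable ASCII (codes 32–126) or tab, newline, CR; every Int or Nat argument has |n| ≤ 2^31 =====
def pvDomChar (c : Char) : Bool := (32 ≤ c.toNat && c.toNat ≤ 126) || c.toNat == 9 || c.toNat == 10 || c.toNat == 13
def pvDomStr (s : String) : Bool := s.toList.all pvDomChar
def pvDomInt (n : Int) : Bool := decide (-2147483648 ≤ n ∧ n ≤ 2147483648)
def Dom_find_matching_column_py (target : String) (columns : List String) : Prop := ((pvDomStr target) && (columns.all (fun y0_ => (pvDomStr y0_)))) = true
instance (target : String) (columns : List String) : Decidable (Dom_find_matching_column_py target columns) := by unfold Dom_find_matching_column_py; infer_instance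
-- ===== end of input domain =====

-- B replaces A's four sequential scans over `columns` by one pass that keeps the first
-- column of the lowest matching tier (objective: alternative single-pass decomposition).

-- ===== PORT A =====
-- literal transliteration of A: four scans in order, each returning its first hit
def find_matching_column_py (target : String) (columns : List String) : Option String :=
  -- 1. exact match: 'if target in columns: return target'
  if columns.contains target then some target
  else
    -- 2. space-stripped lowercase match
    let target_clean := PySem.Str.lower (PySem.Str.replace target " " "")
    match columns.find? (fun col => PySem.Str.lower (PySem.Str.replace col " " "") == target_clean) with
    | some col => some col
    | none =>
      -- 3. containment match
      match columns.find? (fun col => PySem.Str.isIn target col || PySem.Str.isIn col target) with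
      | some col => some col
      | none =>
        -- 4. keyword match
        let target_keywords := PySem.Str.split₀ target
        match columns.find? (fun col => target_keywords.any (fun k => PySem.Str.isIn k col)) with
        | some col => some col
        | none => none

-- ===== PORT B =====
-- Source B's `tier_below`: the tier of col if it is below bound, else none
def pvTierLt (target target_clean : String) (kws : List String) (bound : Nat) (col : String) : Option Nat :=
  if col == target then some 1
  else if decide (2 < bound) && (PySem.Str.lower (PySem.Str.replace col " " "") == target_clean) then some 2
  else if decide (3 < bound) && (PySem.Str.isIn target col || PySem.Str.isIn col target) then some 3
  else if decide (4 < bound) && kws.any (fun k => PySem.Str.isIn k col) then some 4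
  else none

-- Source B's loop: state (bound, best); update on a tier below bound, break on tier 1
def pvLoop (target target_clean : String) (kws : List String) :
    List String → Nat × Option String → Nat × Option String
  | [], st => st
  | col :: rest, (bound, best) =>
    match pvTierLt target target_clean kws bound col with
    | none => pvLoop target target_clean kws rest (bound, best)
    | some t => if t == 1 then (t, some col) else pvLoop target target_clean kws rest (t, some col)

def find_matching_column_py_alt (target : String) (columns : List String) : Option String :=
  let target_clean := PySem.Str.lower (PySem.Str.replace target " " "")
  let kws := PySem.Str.split₀ target
  match pvLoop target target_clean kws columns (5, none) with
  | (_, none) => none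
  | (bound, some best) => if bound == 1 then some target else some best

-- ===== PRECONDITION & SPEC =====
def Spec_find_matching_column_py (target : String) (columns : List String) (out : Option String) : Prop := out = find_matching_column_py_alt target columns
instance (target : String) (columns : List String) (out : Option String) : Decidable (Spec_find_matching_column_py target columns out) := by unfold Spec_find_matching_column_py; infer_instance

-- ===== CLAIM (what is proved, stated in full; the proofs are below) =====
def Claim_equal_find_matching_column_py : Prop := ∀ (target : String) (columns : List String), Dom_find_matching_column_py target columns → Spec_find_matching_column_py target columns (find_matching_column_py target columns)

-- ===== LEMMAS AND PROOFS =====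

-- the (unbounded) tier of a column: the number of the first of A's four scans it matches
def pvTier (target target_clean : String) (kws : List String) (col : String) : Nat :=
  if col == target then 1
  else if PySem.Str.lower (PySem.Str.replace col " " "") == target_clean then 2
  else if PySem.Str.isIn target col || PySem.Str.isIn col target then 3
  else if kws.any (fun k => PySem.Str.isIn k col) then 4
  else 5

-- every tier is at most 5
theorem pvTier_le_five (target tc : String) (kws : List String) (c : String) :
    pvTier target tc kws c ≤ 5 := by
  unfold pvTier; split_ifs <;> omega

-- the bounded tier test computes the tier, cut off at bound (for 2 ≤ bound ≤ 5)
theorem pvTierLt_eq (target tc : String) (kws : List String) (bound : Nat)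
    (hb : 2 ≤ bound) (hb5 : bound ≤ 5) (col : String) :
    pvTierLt target tc kws bound col =
      if pvTier target tc kws col < bound then some (pvTier target tc kws col) else none := by
  unfold pvTierLt pvTier
  by_cases h1 : (col == target) = true
  · rw [h1]
    have h1b : 1 < bound := by omega
    simp [h1b]
  · rw [Bool.eq_false_iff.mpr (fun h' => h1 h')]
    by_cases h2 : (PySem.Str.lower (PySem.Str.replace col " " "") == tc) = true
    · rw [h2]
      by_cases hb2 : 2 < bound
      · simp [hb2]
      · have nb3 : ¬ 3 < bound := by omega
        have nb4 : ¬ 4 < bound := by omega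
        simp [hb2, nb3, nb4]
    · rw [Bool.eq_false_iff.mpr (fun h' => h2 h')]
      by_cases h3 : (PySem.Str.isIn target col || PySem.Str.isIn col target) = true
      · rw [h3]
        by_cases hb3 : 3 < bound
        · have b2 : 2 < bound := by omega
          simp [hb3, b2]
        · have nb4 : ¬ 4 < bound := by omega
          simp [hb3, nb4]
      · rw [Bool.eq_false_iff.mpr (fun h' => h3 h')]
        by_cases h4 : (kws.any (fun k => PySem.Str.isIn k col)) = true
        · rw [h4]
          by_cases hb4 : 4 < bound
          · have b3 : 3 < bound := by omega
            simp [hb4, b3]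
          · simp [hb4]
        · rw [Bool.eq_false_iff.mpr (fun h' => h4 h')]
          have nb5 : ¬ 5 < bound := by omega
          simp [nb5]

-- a column that is not the target never yields tier 1, so the loop never breaks on it
theorem pvTierLt_ne_one (target tc : String) (kws : List String) (bound : Nat) (col : String)
    (hc : (col == target) = false) (t : Nat)
    (h : pvTierLt target tc kws bound col = some t) : (t == 1) = false := by
  unfold pvTierLt at h
  rw [hc] at h
  simp only [Bool.false_eq_true, if_false] at h
  split_ifs at h <;> simp_all <;> omega

-- the loop distributes over append as long as no break (tier 1) occurs in the first part
theorem pvLoop_append (target tc : String) (kws : List String) :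
    ∀ (l₁ l₂ : List String) (st : Nat × Option String),
      (∀ c ∈ l₁, (c == target) = false) →
      pvLoop target tc kws (l₁ ++ l₂) st = pvLoop target tc kws l₂ (pvLoop target tc kws l₁ st) := by
  intro l₁
  induction l₁ with
  | nil => intro l₂ st _; rfl
  | cons c l ih =>
    intro l₂ ⟨bound, best⟩ h
    have hc := h c (by simp)
    have htail : ∀ c' ∈ l, (c' == target) = false := fun c' hc' => h c' (by simp [hc'])
    rcases ht : pvTierLt target tc kws bound c with _ | t
    · simp only [List.cons_append, pvLoop, ht]
      exact ih l₂ _ htail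
    · simp only [List.cons_append, pvLoop, ht, pvTierLt_ne_one target tc kws bound c hc t ht,
        Bool.false_eq_true, if_false]
      exact ih l₂ _ htail

-- once `best` has reached tier k and all remaining tiers are ≥ k, the loop is frozen
theorem pvFold_keep (target tc : String) (kws : List String) (k : Nat)
    (hk : 2 ≤ k) (hk5 : k ≤ 5) (bc : String) :
    ∀ (l : List String), (∀ c ∈ l, k ≤ pvTier target tc kws c) →
      pvLoop target tc kws l (k, some bc) = (k, some bc) := by
  intro l
  induction l with
  | nil => intro _; rfl
  | cons c l ih =>
    intro h
    have ht : pvTierLt target tc kws k c = none := by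
      rw [pvTierLt_eq target tc kws k hk hk5 c]
      simp [Nat.not_lt.mpr (h c (by simp))]
    simp only [pvLoop, ht]
    exact ih (fun c' hc' => h c' (by simp [hc']))

-- loop invariant: for 1 ≤ k < 5, starting from (5, none) or a bound in (k, 5] and seeing
-- only tiers above k, the loop never breaks and its state stays of that shape
theorem pvFold_high (target tc : String) (kws : List String) (k : Nat)
    (hk1 : 1 ≤ k) (hk5 : k < 5) :
    ∀ (l : List String), (∀ c ∈ l, k < pvTier target tc kws c) →
      ∀ (st : Nat × Option String),
        (st = (5, none) ∨ ∃ bt bc, st = (bt, some bc) ∧ k < bt ∧ bt ≤ 5) →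
        (pvLoop target tc kws l st = (5, none) ∨
          ∃ bt bc, pvLoop target tc kws l st = (bt, some bc) ∧ k < bt ∧ bt ≤ 5) := by
  intro l
  induction l with
  | nil => intro _ st hst; exact hst
  | cons c l ih =>
    intro h st hst
    have hc := h c (by simp)
    have ih' := ih (fun c' hc' => h c' (by simp [hc']))
    have hbig : ∀ (bound : Nat) (best : Option String), st = (bound, best) →
        2 ≤ bound ∧ k < bound ∧ bound ≤ 5 := by
      intro bound best hb
      rcases hst with rfl | ⟨bt, bc, rfl, hbt, hbt5⟩ <;> (injection hb with e1 e2; omega)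
    obtain ⟨bound, best⟩ := st
    obtain ⟨hb2, hbk, hb5⟩ := hbig bound best rfl
    by_cases hlt : pvTier target tc kws c < bound
    · have ht : pvTierLt target tc kws bound c = some (pvTier target tc kws c) := by
        rw [pvTierLt_eq target tc kws bound hb2 hb5 c, if_pos hlt]
      have hne1 : (pvTier target tc kws c == 1) = false := by simp; omega
      simp only [pvLoop, ht, hne1, Bool.false_eq_true, if_false]
      exact ih' _ (Or.inr ⟨pvTier target tc kws c, c, rfl, hc, pvTier_le_five target tc kws c⟩)
    · have ht : pvTierLt target tc kws bound c = none := by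
        rw [pvTierLt_eq target tc kws bound hb2 hb5 c, if_neg hlt]
      simp only [pvLoop, ht]
      exact ih' _ (by
        rcases hst with hst | ⟨bt, bc, hst, hbt, hbt5⟩
        · exact Or.inl hst
        · exact Or.inr ⟨bt, bc, hst, hbt, hbt5⟩)

-- if the list splits as pre ++ c0 :: suf with tiers > k before c0, = k at c0, ≥ k after,
-- then the single pass ends in state (k, c0)
theorem pvFold_hit (target tc : String) (kws : List String) (k : Nat) (hk1 : 1 ≤ k) (hk : k < 5)
    (pre suf : List String) (c0 : String)
    (hpre : ∀ c ∈ pre, k < pvTier target tc kws c)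
    (hc0 : pvTier target tc kws c0 = k)
    (hsuf : ∀ c ∈ suf, k ≤ pvTier target tc kws c) :
    pvLoop target tc kws (pre ++ c0 :: suf) (5, none) = (k, some c0) := by
  have hprene : ∀ c ∈ pre, (c == target) = false := by
    intro c hcm
    by_cases hb : (c == target) = true
    · have h1 : pvTier target tc kws c = 1 := by unfold pvTier; rw [hb]; simp
      have := hpre c hcm; omega
    · exact Bool.eq_false_iff.mpr (fun h' => hb h')
  rw [pvLoop_append target tc kws pre _ _ hprene]
  have hQ := pvFold_high target tc kws k hk1 hk pre hpre (5, none) (Or.inl rfl)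
  have hstep : ∀ (bound : Nat) (best : Option String), 2 ≤ bound → k < bound → bound ≤ 5 →
      pvLoop target tc kws (c0 :: suf) (bound, best) = (k, some c0) := by
    intro bound best hb2 hbk hb5
    have ht : pvTierLt target tc kws bound c0 = some k := by
      rw [pvTierLt_eq target tc kws bound hb2 hb5 c0, hc0, if_pos hbk]
    by_cases hone : k = 1
    · subst hone; simp [pvLoop, ht]
    · have hne1 : (k == 1) = false := by simp [hone]
      simp only [pvLoop, ht, hne1, Bool.false_eq_true, if_false]
      exact pvFold_keep target tc kws k (by omega) (by omega) c0 suf hsuf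
  rcases hQ with hnone | ⟨bt, bc, hsome, hbt, hbt5⟩
  · rw [hnone]; exact hstep 5 none (by omega) (by omega) (by omega)
  · rw [hsome]; exact hstep bt (some bc) (by omega) hbt hbt5

-- if no column matches any tier, the loop stays at (5, none)
theorem pvFold_none (target tc : String) (kws : List String) :
    ∀ (l : List String), (∀ c ∈ l, pvTier target tc kws c = 5) →
      pvLoop target tc kws l (5, none) = (5, none) := by
  intro l
  induction l with
  | nil => intro _; rfl
  | cons c l ih =>
    intro h
    have ht : pvTierLt target tc kws 5 c = none := by
      rw [pvTierLt_eq target tc kws 5 (by omega) (by omega) c]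
      simp [h c (by simp)]
    simp only [pvLoop, ht]
    exact ih (fun c' hc' => h c' (by simp [hc']))

-- tier arithmetic: each of A's predicates pins the tier, given the earlier ones failed
theorem pvTier_ge_one (target tc : String) (kws : List String) (c : String) :
    1 ≤ pvTier target tc kws c := by
  unfold pvTier; split_ifs <;> omega

theorem pvTier_eq_one (target tc : String) (kws : List String) (c : String)
    (h : (c == target) = true) : pvTier target tc kws c = 1 := by
  unfold pvTier; rw [h]; simp

theorem pvTier_ge_two (target tc : String) (kws : List String) (c : String)
    (h : (c == target) = false) : 2 ≤ pvTier target tc kws c := by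
  unfold pvTier; rw [h]; simp only [Bool.false_eq_true, if_false]; split_ifs <;> omega

theorem pvTier_eq_two (target tc : String) (kws : List String) (c : String)
    (h1 : (c == target) = false)
    (h2 : (PySem.Str.lower (PySem.Str.replace c " " "") == tc) = true) :
    pvTier target tc kws c = 2 := by
  unfold pvTier; rw [h1, h2]; simp

theorem pvTier_ge_three (target tc : String) (kws : List String) (c : String)
    (h1 : (c == target) = false)
    (h2 : (PySem.Str.lower (PySem.Str.replace c " " "") == tc) = false) :
    3 ≤ pvTier target tc kws c := by
  unfold pvTier; rw [h1, h2]; simp only [Bool.false_eq_true, if_false]; split_ifs <;> omega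

theorem pvTier_eq_three (target tc : String) (kws : List String) (c : String)
    (h1 : (c == target) = false)
    (h2 : (PySem.Str.lower (PySem.Str.replace c " " "") == tc) = false)
    (h3 : (PySem.Str.isIn target c || PySem.Str.isIn c target) = true) :
    pvTier target tc kws c = 3 := by
  unfold pvTier; rw [h1, h2, h3]; simp

theorem pvTier_ge_four (target tc : String) (kws : List String) (c : String)
    (h1 : (c == target) = false)
    (h2 : (PySem.Str.lower (PySem.Str.replace c " " "") == tc) = false)
    (h3 : (PySem.Str.isIn target c || PySem.Str.isIn c target) = false) :
    4 ≤ pvTier target tc kws c := by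
  unfold pvTier; rw [h1, h2, h3]; simp only [Bool.false_eq_true, if_false]; split_ifs <;> omega

theorem pvTier_eq_four (target tc : String) (kws : List String) (c : String)
    (h1 : (c == target) = false)
    (h2 : (PySem.Str.lower (PySem.Str.replace c " " "") == tc) = false)
    (h3 : (PySem.Str.isIn target c || PySem.Str.isIn c target) = false)
    (h4 : (kws.any (fun k => PySem.Str.isIn k c)) = true) :
    pvTier target tc kws c = 4 := by
  unfold pvTier; rw [h1, h2, h3, h4]; simp

theorem pvTier_eq_five (target tc : String) (kws : List String) (c : String)
    (h1 : (c == target) = false)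
    (h2 : (PySem.Str.lower (PySem.Str.replace c " " "") == tc) = false)
    (h3 : (PySem.Str.isIn target c || PySem.Str.isIn c target) = false)
    (h4 : (kws.any (fun k => PySem.Str.isIn k c)) = false) :
    pvTier target tc kws c = 5 := by
  unfold pvTier; rw [h1, h2, h3, h4]; simp

-- no column equals the target when `contains` is false
theorem pvNotContains (target : String) (columns : List String)
    (hcont : ¬ columns.contains target = true) :
    ∀ c ∈ columns, (c == target) = false := by
  intro c hc
  by_cases hb : (c == target) = true
  · exact absurd (List.contains_iff_exists_mem_beq.mpr
      ⟨c, hc, by rw [beq_iff_eq.mp hb]; simp⟩) hcont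
  · simpa using hb

-- ===== VERDICT (by name: the statement is the Claim_ definition above) =====
theorem find_matching_column_py_spec : Claim_equal_find_matching_column_py := by
  intro target columns _
  unfold Spec_find_matching_column_py
  simp only [find_matching_column_py, find_matching_column_py_alt]
  set tc := PySem.Str.lower (PySem.Str.replace target " " "") with htc
  set kws := PySem.Str.split₀ target with hkws
  by_cases hcont : columns.contains target = true
  · -- tier 1: some column equals target; the pass yields (1, _) hence `some target`
    rw [if_pos hcont]
    obtain ⟨c', hc'mem, hc'⟩ := List.contains_iff_exists_mem_beq.mp hcont
    have hsome : (columns.find? (fun c => c == target)).isSome := by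
      rw [List.find?_isSome]
      exact ⟨c', hc'mem, by rw [(beq_iff_eq.mp hc').symm]; simp⟩
    obtain ⟨c0, hc0⟩ := Option.isSome_iff_exists.mp hsome
    obtain ⟨hp, pre, suf, hsplit, hpre⟩ := List.find?_eq_some_iff_append.mp hc0
    rw [hsplit, pvFold_hit target tc kws 1 (by omega) (by omega) pre suf c0
      (fun c hc => by
        have h1 : (c == target) = false := by simpa using hpre c hc
        have := pvTier_ge_two target tc kws c h1; omega)
      (pvTier_eq_one target tc kws c0 hp)
      (fun c _ => pvTier_ge_one target tc kws c)]
    simp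
  · rw [if_neg hcont]
    have hne : ∀ c ∈ columns, (c == target) = false := pvNotContains target columns hcont
    by_cases h2 : (columns.find? (fun col => PySem.Str.lower (PySem.Str.replace col " " "") == tc)).isSome
    · -- tier 2
      obtain ⟨c0, hc0⟩ := Option.isSome_iff_exists.mp h2
      rw [hc0]
      obtain ⟨hp, pre, suf, hsplit, hpre⟩ := List.find?_eq_some_iff_append.mp hc0
      have hc0mem : c0 ∈ columns := by rw [hsplit]; simp
      rw [hsplit, pvFold_hit target tc kws 2 (by omega) (by omega) pre suf c0
        (fun c hc => by
          have hcolmem : c ∈ columns := by rw [hsplit]; simp [hc]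
          have := pvTier_ge_three target tc kws c (hne c hcolmem) (by simpa using hpre c hc)
          omega)
        (pvTier_eq_two target tc kws c0 (hne c0 hc0mem) hp)
        (fun c hc => by
          have hcolmem : c ∈ columns := by rw [hsplit]; simp [hc]
          have := pvTier_ge_two target tc kws c (hne c hcolmem); omega)]
      simp
    · have h2n : columns.find? (fun col => PySem.Str.lower (PySem.Str.replace col " " "") == tc) = none :=
        Option.not_isSome_iff_eq_none.mp h2
      rw [h2n]
      have hne2 : ∀ c ∈ columns, (PySem.Str.lower (PySem.Str.replace c " " "") == tc) = false := by
        intro c hc; simpa using List.find?_eq_none.mp h2n c hc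
      by_cases h3 : (columns.find? (fun col => PySem.Str.isIn target col || PySem.Str.isIn col target)).isSome
      · -- tier 3
        obtain ⟨c0, hc0⟩ := Option.isSome_iff_exists.mp h3
        rw [hc0]
        obtain ⟨hp, pre, suf, hsplit, hpre⟩ := List.find?_eq_some_iff_append.mp hc0
        have hc0mem : c0 ∈ columns := by rw [hsplit]; simp
        rw [hsplit, pvFold_hit target tc kws 3 (by omega) (by omega) pre suf c0
          (fun c hc => by
            have hcolmem : c ∈ columns := by rw [hsplit]; simp [hc]
            have := pvTier_ge_four target tc kws c (hne c hcolmem) (hne2 c hcolmem)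
              (by simpa using hpre c hc)
            omega)
          (pvTier_eq_three target tc kws c0 (hne c0 hc0mem) (hne2 c0 hc0mem) hp)
          (fun c hc => by
            have hcolmem : c ∈ columns := by rw [hsplit]; simp [hc]
            have := pvTier_ge_three target tc kws c (hne c hcolmem) (hne2 c hcolmem); omega)]
        simp
      · have h3n : columns.find? (fun col => PySem.Str.isIn target col || PySem.Str.isIn col target) = none :=
          Option.not_isSome_iff_eq_none.mp h3
        rw [h3n]
        have hne3 : ∀ c ∈ columns, (PySem.Str.isIn target c || PySem.Str.isIn c target) = false := by
          intro c hc; simpa using List.find?_eq_none.mp h3n c hc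
        by_cases h4 : (columns.find? (fun col => kws.any (fun k => PySem.Str.isIn k col))).isSome
        · -- tier 4
          obtain ⟨c0, hc0⟩ := Option.isSome_iff_exists.mp h4
          rw [hc0]
          obtain ⟨hp, pre, suf, hsplit, hpre⟩ := List.find?_eq_some_iff_append.mp hc0
          have hc0mem : c0 ∈ columns := by rw [hsplit]; simp
          rw [hsplit, pvFold_hit target tc kws 4 (by omega) (by omega) pre suf c0
            (fun c hc => by
              have hcolmem : c ∈ columns := by rw [hsplit]; simp [hc]
              have := pvTier_eq_five target tc kws c (hne c hcolmem) (hne2 c hcolmem)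
                (hne3 c hcolmem) (by simpa using hpre c hc)
              omega)
            (pvTier_eq_four target tc kws c0 (hne c0 hc0mem) (hne2 c0 hc0mem) (hne3 c0 hc0mem) hp)
            (fun c hc => by
              have hcolmem : c ∈ columns := by rw [hsplit]; simp [hc]
              have := pvTier_ge_four target tc kws c (hne c hcolmem) (hne2 c hcolmem) (hne3 c hcolmem)
              omega)]
          simp
        · have h4n : columns.find? (fun col => kws.any (fun k => PySem.Str.isIn k col)) = none :=
            Option.not_isSome_iff_eq_none.mp h4
          rw [h4n]
          have hne4 : ∀ c ∈ columns, (kws.any (fun k => PySem.Str.isIn k c)) = false := by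
            intro c hc; simpa using List.find?_eq_none.mp h4n c hc
          rw [pvFold_none target tc kws columns
            (fun c hc => pvTier_eq_five target tc kws c (hne c hc) (hne2 c hc) (hne3 c hc) (hne4 c hc))]
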